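-- pv_equiv track=rewrite | github.com/1Boop2/pfx-signtool | sign_with_pfx.py | format_cmd_safe
-- ===== SOURCE A (Python) =====
-- from typing import Iterable, List, Optional, Sequence, Tuple
--
-- def format_cmd_safe(cmd: Sequence[str]) -> str:
--     """Строка команды для лога без вывода пароля (аргумент после '/p')."""
--     safe = []
--     hide_next = False
--     for part in cmd:
--         if hide_next:
--             safe.append("***")
--             hide_next = False
--             continue
--         safe.append(part)
--         if part.lower() == "/p":
--             hide_next = True
--     return " ".join(f'"{c}"' if " " in c and not c.startswith('"') else c for c in safe)
-- ===== SOURCE B (Python) =====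
-- def format_cmd_safe(cmd):
--     """Строка команды для лога без вывода пароля (аргумент после '/p')."""
--     # Staged, stateless formulation: token i is masked iff the run of
--     # consecutive literal '/p' tokens immediately before it has odd length.
--     is_p = [c.lower() == "/p" for c in cmd]
--     run = [0]
--     for p in is_p:
--         run.append(run[-1] + 1 if p else 0)
--     safe = ["***" if run[i] % 2 == 1 else c for i, c in enumerate(cmd)]
--     return " ".join(f'"{c}"' if " " in c and not c.startswith('"') else c for c in safe)
-- ===== Notes on version B (the rewrite author's own statement) =====
-- stated objective: alternative
-- what changed: Replaces A's stateful scan with a hide_next flag by a stateless characterization computed in staged passes: token i is masked iff the run of consecutive literal '/p' tokens immediately before it has odd length (boolean map, then a run-length prefix table, then mask by parity), with the same quoting join.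
import Mathlib
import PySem

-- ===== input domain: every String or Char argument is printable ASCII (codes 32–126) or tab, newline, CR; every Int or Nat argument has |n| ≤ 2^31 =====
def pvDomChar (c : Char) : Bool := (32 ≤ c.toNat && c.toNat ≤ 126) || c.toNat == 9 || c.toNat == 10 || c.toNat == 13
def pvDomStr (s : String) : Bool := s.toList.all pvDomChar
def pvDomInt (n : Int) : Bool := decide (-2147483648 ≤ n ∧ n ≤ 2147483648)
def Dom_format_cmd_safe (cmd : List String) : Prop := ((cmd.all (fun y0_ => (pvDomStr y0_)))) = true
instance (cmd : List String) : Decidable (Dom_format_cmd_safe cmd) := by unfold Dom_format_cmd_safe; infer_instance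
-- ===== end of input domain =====

-- B replaces A's stateful hide_next scan by a stateless rule (mask token i iff the run of
-- literal '/p' tokens just before it has odd length), computed in staged passes; same cost.

-- ===== PORT A =====
-- f'"{c}"' if " " in c and not c.startswith('"') else c   (shared final join of both sources)
def fcsQuote (c : String) : String :=
  if PySem.Str.isIn " " c && !(PySem.Str.startswith c "\"") then
    PySem.Str.join "" ["\"", c, "\""]
  else c

def fcsStepA (st : List String × Bool) (part : String) : List String × Bool :=
  if st.2 then (st.1 ++ ["***"], false)
  else (st.1 ++ [part], PySem.Str.lower part == "/p")

def format_cmd_safe (cmd : List String) : String :=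
  let st := cmd.foldl fcsStepA ([], false)
  PySem.Str.join " " (st.1.map fcsQuote)

-- ===== PORT B =====
-- the run-length table: for each token, the length of the run of '/p' tokens ending at it
-- (Source B's `run` list without its leading 0; the loop `run.append(run[-1]+1 if p else 0)`)
def fcsRunGo : List Bool → Nat → List Nat
  | [], _ => []
  | p :: rest, r =>
    let r' := if p then r + 1 else 0
    r' :: fcsRunGo rest r'

def format_cmd_safe_alt (cmd : List String) : String :=
  let isP := cmd.map (fun c => PySem.Str.lower c == "/p")
  let run := 0 :: fcsRunGo isP 0          -- run[i] = '/p'-run length just before token i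
  let safe := (cmd.zip run).map (fun cr => if cr.2 % 2 == 1 then "***" else cr.1)
  PySem.Str.join " " (safe.map fcsQuote)

-- ===== PRECONDITION & SPEC =====
def Spec_format_cmd_safe (cmd : List String) (out : String) : Prop := out = format_cmd_safe_alt cmd
instance (cmd : List String) (out : String) : Decidable (Spec_format_cmd_safe cmd out) := by unfold Spec_format_cmd_safe; infer_instance

-- ===== CLAIM (what is proved, stated in full; the proofs are below) =====
def Claim_equal_format_cmd_safe : Prop := ∀ (cmd : List String), Dom_format_cmd_safe cmd → Spec_format_cmd_safe cmd (format_cmd_safe cmd)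

-- ===== LEMMAS AND PROOFS =====
-- B's masked list, written as a recursion carrying the current '/p'-run length r.
def fcsMaskGo : List String → Nat → List String
  | [], _ => []
  | c :: rest, r =>
    (if r % 2 == 1 then "***" else c) ::
      fcsMaskGo rest (if PySem.Str.lower c == "/p" then r + 1 else 0)

-- B's zip-with-run-table construction equals the fused recursion.
lemma fcs_zip_eq (cmd : List String) (r : Nat) :
    (cmd.zip (r :: fcsRunGo (cmd.map (fun c => PySem.Str.lower c == "/p")) r)).map
        (fun cr => if cr.2 % 2 == 1 then "***" else cr.1)
      = fcsMaskGo cmd r := by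
  induction cmd generalizing r with
  | nil => simp [fcsMaskGo]
  | cons c rest ih =>
      simp only [List.map, fcsRunGo, List.zip, List.zipWith, fcsMaskGo]
      exact congrArg _ (ih _)

-- A's invariant: the flag equals the parity of the current '/p'-run length.
lemma fcs_fold_eq (cmd : List String) (acc : List String) (r : Nat) :
    (cmd.foldl fcsStepA (acc, r % 2 == 1)).1 = acc ++ fcsMaskGo cmd r := by
  induction cmd generalizing acc r with
  | nil => simp [fcsMaskGo]
  | cons c rest ih =>
      by_cases hp : PySem.Str.lower c == "/p"
      · rcases Nat.even_or_odd r with he | ho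
        · have hr : (r % 2 == 1) = false := by
            simp [Nat.even_iff.mp he]
          have hr' : ((r + 1) % 2 == 1) = true := by
            simp [Nat.add_mod, Nat.even_iff.mp he]
          simp only [List.foldl, fcsStepA, hr, if_false, Bool.false_eq_true, hp]
          rw [← hr', ih]
          simp [fcsMaskGo, hr, hp]
        · have hr : (r % 2 == 1) = true := by
            simp [Nat.odd_iff.mp ho]
          have hr' : ((r + 1) % 2 == 1) = false := by
            simp [Nat.add_mod, Nat.odd_iff.mp ho]
          simp only [List.foldl, fcsStepA, hr, if_true]
          rw [← hr', ih]
          simp [fcsMaskGo, hr, hp]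
      · rcases Nat.even_or_odd r with he | ho
        · have hr : (r % 2 == 1) = false := by
            simp [Nat.even_iff.mp he]
          simp only [List.foldl, fcsStepA, hr, if_false, Bool.false_eq_true, hp]
          have h0 : ((0 : Nat) % 2 == 1) = false := by decide
          rw [← h0, ih]
          simp [fcsMaskGo, hr, hp]
        · have hr : (r % 2 == 1) = true := by
            simp [Nat.odd_iff.mp ho]
          simp only [List.foldl, fcsStepA, hr, if_true]
          have h0 : ((0 : Nat) % 2 == 1) = false := by decide
          rw [← h0, ih]
          simp [fcsMaskGo, hr, hp]

-- ===== VERDICT (by name: the statement is the Claim_ definition above) =====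
theorem format_cmd_safe_spec : Claim_equal_format_cmd_safe := by
  intro cmd _
  unfold Spec_format_cmd_safe format_cmd_safe format_cmd_safe_alt
  simp only []
  rw [fcs_zip_eq cmd 0]
  have h0 : ((0 : Nat) % 2 == 1) = false := by decide
  rw [show (false : Bool) = ((0 : Nat) % 2 == 1) from h0.symm, fcs_fold_eq cmd [] 0]
  simp
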